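-- pv_equiv track=rewrite | github.com/k-harada/AtCoder | ABC/ABC201-250/ABC218/E.py | solve
-- ===== SOURCE A (Python) =====
-- class UnionFind:
--
--     def __init__(self, n):
--         self.par = [i for i in range(n + 1)]
--         self.rank = [0] * (n + 1)
--
--     # search
--     def find(self, x):
--         if self.par[x] == x:
--             return x
--         else:
--             self.par[x] = self.find(self.par[x])
--             return self.par[x]
--
--     # unite
--     def union(self, x, y):
--         x = self.find(x)
--         y = self.find(y)
--         if self.rank[x] < self.rank[y]:
--             self.par[x] = y
--         else:
--             self.par[y] = x
--             if self.rank[x] == self.rank[y]: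
--                 self.rank[x] += 1
--
--     # check
--     def same_check(self, x, y):
--         return self.find(x) == self.find(y)
--
-- def solve(n, m, abc_list):
--     abc_list_s = list(sorted(abc_list, key=lambda x: x[2]))
--     res = 0
--     uf = UnionFind(n)
--     for a, b, c in abc_list_s:
--         if uf.same_check(a, b):
--             if c > 0:
--                 res += c
--         else:
--             uf.union(a, b)
--     return res
-- ===== SOURCE B (Python) =====
-- def solve(n, m, abc_list):
--     comp = list(range(n + 1))
--     res = 0
--     for a, b, c in sorted(abc_list, key=lambda x: x[2]):
--         ca = comp[a]
--         cb = comp[b]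
--         if ca == cb:
--             if c > 0:
--                 res += c
--         else:
--             comp = [ca if l == cb else l for l in comp]
--     return res
-- ===== Notes on version B (the rewrite author's own statement) =====
-- stated objective: simpler
-- what changed: Replaces the recursive path-compressing, rank-balanced union-find class with a flat component-label array that is relabelled on each merge, so B has no recursion and no auxiliary rank state; the scan over the edges sorted by weight stays.
import Mathlib
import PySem

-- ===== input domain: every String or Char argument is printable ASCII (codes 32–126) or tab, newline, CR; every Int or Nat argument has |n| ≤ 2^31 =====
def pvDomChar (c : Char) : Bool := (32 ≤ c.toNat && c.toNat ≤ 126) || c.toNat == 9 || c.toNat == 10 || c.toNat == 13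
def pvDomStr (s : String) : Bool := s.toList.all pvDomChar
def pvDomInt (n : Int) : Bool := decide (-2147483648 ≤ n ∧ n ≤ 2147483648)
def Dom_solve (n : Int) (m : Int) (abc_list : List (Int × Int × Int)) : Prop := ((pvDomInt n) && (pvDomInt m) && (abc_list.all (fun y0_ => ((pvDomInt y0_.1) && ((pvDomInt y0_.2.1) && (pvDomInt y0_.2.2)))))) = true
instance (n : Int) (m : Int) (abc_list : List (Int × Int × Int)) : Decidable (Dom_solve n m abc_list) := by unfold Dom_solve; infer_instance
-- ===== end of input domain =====

-- B replaces A's recursive path-compressing, rank-balanced union-find class by a flat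
-- component-label array relabelled on each merge (objective: a simpler data structure, not speed).

-- ===== PORT A =====
-- UnionFind.find with fuel (Python's recursion is unbounded; the fuel only makes the
-- port total and is never exhausted on inputs satisfying Pre_): returns (root, new par).
def findA (f : Nat) (par : List Int) (x : Int) : Int × List Int :=
  match f with
  | 0 => (x, par)
  | f + 1 =>
    let px := PySem.List.pyGetD par x 0
    if px == x then (x, par)
    else
      let rp := findA f par px
      let par2 := PySem.List.pySetD rp.2 x rp.1
      (PySem.List.pyGetD par2 x 0, par2)

-- UnionFind.union
def unionA (f : Nat) (par : List Int) (rank : List Int) (x : Int) (y : Int) :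
    List Int × List Int :=
  let rx := findA f par x
  let ry := findA f rx.2 y
  let x1 := rx.1
  let y1 := ry.1
  let par2 := ry.2
  if PySem.List.pyGetD rank x1 0 < PySem.List.pyGetD rank y1 0 then
    (PySem.List.pySetD par2 x1 y1, rank)
  else
    let par3 := PySem.List.pySetD par2 y1 x1
    if PySem.List.pyGetD rank x1 0 == PySem.List.pyGetD rank y1 0 then
      (par3, PySem.List.pySetD rank x1 (PySem.List.pyGetD rank x1 0 + 1))
    else (par3, rank)
def sameCheckA (f : Nat) (par : List Int) (x : Int) (y : Int) : Bool × List Int :=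
  let rx := findA f par x
  let ry := findA f rx.2 y
  (rx.1 == ry.1, ry.2)

-- solve
def solve (n : Int) (m : Int) (abc_list : List (Int × Int × Int)) : Int :=
  let abc_list_s := PySem.List.sorted abc_list (fun x => x.2.2) false
  let F := (n + 1).toNat + abc_list.length + 1
  let st0 : Int × List Int × List Int :=
    (0, (PySem.List.pyRange 0 (n + 1) 1).map (fun i => i), List.replicate (n + 1).toNat 0)
  (abc_list_s.foldl (fun st e =>
      let res := st.1
      let par := st.2.1
      let rank := st.2.2
      let sc := sameCheckA F par e.1 e.2.1
      if sc.1 then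
        (if e.2.2 > 0 then (res + e.2.2, sc.2, rank) else (res, sc.2, rank))
      else
        let ur := unionA F sc.2 rank e.1 e.2.1
        (res, ur.1, ur.2)) st0).1

-- ===== PORT B =====
def solve_alt (n : Int) (m : Int) (abc_list : List (Int × Int × Int)) : Int :=
  (((PySem.List.sorted abc_list (fun x => x.2.2) false)).foldl
    (fun (st : Int × List Int) e =>
      let ca := PySem.List.pyGetD st.2 e.1 0
      let cb := PySem.List.pyGetD st.2 e.2.1 0
      if ca == cb then
        (if e.2.2 > 0 then (st.1 + e.2.2, st.2) else (st.1, st.2))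
      else (st.1, st.2.map (fun l => if l == cb then ca else l)))
    (0, PySem.List.pyRange 0 (n + 1) 1)).1

-- ===== PRECONDITION & SPEC =====
-- Pre_ admits every input on which Python A returns: either no edges at all, or n ≥ 0 with
-- every endpoint a Python-valid index into the (n+1)-element parent list, i.e. in [-(n+1), n]
-- (negative labels wrap, Python-style); outside it A raises IndexError.
def Pre_solve (n : Int) (m : Int) (abc_list : List (Int × Int × Int)) : Prop :=
  abc_list = [] ∨
    (0 ≤ n ∧ ∀ e ∈ abc_list,
      (-(n + 1) ≤ e.1 ∧ e.1 ≤ n) ∧ (-(n + 1) ≤ e.2.1 ∧ e.2.1 ≤ n))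
instance (n : Int) (m : Int) (abc_list : List (Int × Int × Int)) : Decidable (Pre_solve n m abc_list) := by unfold Pre_solve; infer_instance

def pvWitness_solve : Int × Int × (List (Int × Int × Int)) :=
  (3, 4, [(0, 1, 5), (1, 2, -2), (-1, 0, 7), (2, 0, 4)])

def Spec_solve (n : Int) (m : Int) (abc_list : List (Int × Int × Int)) (out : Int) : Prop := out = solve_alt n m abc_list
instance (n : Int) (m : Int) (abc_list : List (Int × Int × Int)) (out : Int) : Decidable (Spec_solve n m abc_list out) := by unfold Spec_solve; infer_instance

-- ===== CLAIM (what is proved, stated in full; the proofs are below) =====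
def Claim_equal_solve : Prop := ∀ (n : Int) (m : Int) (abc_list : List (Int × Int × Int)), Dom_solve n m abc_list → Pre_solve n m abc_list → Spec_solve n m abc_list (solve n m abc_list)

-- ===== LEMMAS AND PROOFS =====
def pvNorm (L : Nat) (x : Int) : Nat := if x < 0 then L - (-x).toNat else x.toNat
theorem pvNorm_lt (L : Nat) (x : Int) (h1 : -(L : Int) ≤ x) (h2 : x < (L : Int)) :
    pvNorm L x < L := by
  unfold pvNorm; split_ifs with h <;> omega
theorem pvNorm_nonneg (L : Nat) (x : Int) (h : 0 ≤ x) : pvNorm L x = x.toNat := by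
  unfold pvNorm; rw [if_neg (by omega)]
theorem pyGetD_norm (xs : List Int) (x : Int) (v : Int) (h1 : -(xs.length : Int) ≤ x)
    (h2 : x < (xs.length : Int)) :
    PySem.List.pyGetD xs x v = xs.getD (pvNorm xs.length x) v := by
  unfold pvNorm
  simp only [PySem.List.pyGetD, PySem.List.pyGet?, PySem.List.pyIdx?, List.getD]
  split_ifs with h3 h4 h5 <;> simp_all <;> omega
theorem pySetD_norm (xs : List Int) (x : Int) (v : Int) (h1 : -(xs.length : Int) ≤ x)
    (h2 : x < (xs.length : Int)) :
    PySem.List.pySetD xs x v = xs.set (pvNorm xs.length x) v := by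
  unfold pvNorm
  simp only [PySem.List.pySetD, PySem.List.pySet?, PySem.List.pyIdx?]
  split_ifs with h3 h4 h5 <;> simp_all <;> omega
def pfN (par : List Int) (k : Nat) : Nat := (par.getD k 0).toNat
def rootF : Nat → List Int → Nat → Nat
  | 0, _, k => k
  | f + 1, par, k => if pfN par k = k then k else rootF f par (pfN par k)
def GoodUF (N : Nat) (par : List Int) : Prop :=
  par.length = N ∧ ∀ k, k < N → 0 ≤ par.getD k 0 ∧ pfN par k < N
def MeasUF (N : Nat) (par : List Int) (d : Nat → Nat) (b : Nat) : Prop :=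
  (∀ k, k < N → pfN par k = k → d k = 0) ∧
  (∀ k, k < N → pfN par k ≠ k → d (pfN par k) < d k) ∧
  (∀ k, k < N → d k ≤ b)
theorem rootF_of_root (f : Nat) (par : List Int) (k : Nat) (h : pfN par k = k) :
    rootF f par k = k := by
  cases f <;> simp [rootF, h]
theorem rootF_step (f : Nat) (par : List Int) (k : Nat) (h : pfN par k ≠ k) :
    rootF (f + 1) par k = rootF f par (pfN par k) := by
  simp [rootF, h]

theorem rootF_adequate (N : Nat) (par : List Int) (d : Nat → Nat) (b : Nat)
    (hG : GoodUF N par) (hM : MeasUF N par d b) :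
    ∀ f f' k, k < N → d k < f → d k < f' → rootF f par k = rootF f' par k := by
  intro f
  induction f with
  | zero => intro f' k hk h; omega
  | succ f ih =>
    intro f' k hk h h'
    by_cases hr : pfN par k = k
    · rw [rootF_of_root, rootF_of_root] <;> assumption
    · obtain ⟨f'', rfl⟩ : ∃ g, f' = g + 1 := ⟨f' - 1, by omega⟩
      rw [rootF_step _ _ _ hr, rootF_step _ _ _ hr]
      have hd := hM.2.1 k hk hr
      exact ih f'' (pfN par k) (hG.2 k hk).2 (by omega) (by omega)

theorem rootF_isRoot (N : Nat) (par : List Int) (d : Nat → Nat) (b : Nat)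
    (hG : GoodUF N par) (hM : MeasUF N par d b) :
    ∀ f k, k < N → d k < f →
      pfN par (rootF f par k) = rootF f par k ∧ rootF f par k < N ∧ d (rootF f par k) = 0 := by
  intro f
  induction f with
  | zero => intro k hk h; omega
  | succ f ih =>
    intro k hk h
    by_cases hr : pfN par k = k
    · rw [rootF_of_root _ _ _ hr]
      exact ⟨hr, hk, hM.1 k hk hr⟩
    · rw [rootF_step _ _ _ hr]
      have hd := hM.2.1 k hk hr
      exact ih (pfN par k) (hG.2 k hk).2 (by omega)

theorem rootF_pf (N : Nat) (par : List Int) (d : Nat → Nat) (b : Nat)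
    (hG : GoodUF N par) (hM : MeasUF N par d b) (f k : Nat) (hk : k < N)
    (hf : d k < f) :
    rootF f par k = rootF f par (pfN par k) := by
  obtain ⟨g, rfl⟩ : ∃ g, f = g + 1 := ⟨f - 1, by omega⟩
  by_cases hr : pfN par k = k
  · rw [hr]
  · rw [rootF_step _ _ _ hr]
    have hd := hM.2.1 k hk hr
    exact rootF_adequate N par d b hG hM g (g+1) (pfN par k) (hG.2 k hk).2 (by omega) (by omega)
theorem getD_set' (xs : List Int) (j k : Nat) (v : Int) (hj : j < xs.length) :
    (xs.set j v).getD k 0 = if k = j then v else xs.getD k 0 := by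
  simp only [List.getD, List.getElem?_set]
  by_cases h : k = j
  · subst h; simp [hj]
  · rw [if_neg h, if_neg (fun hh => h hh.symm)]

theorem pfN_set (par : List Int) (j k : Nat) (v : Int) (hj : j < par.length) :
    pfN (par.set j v) k = if k = j then v.toNat else pfN par k := by
  unfold pfN; rw [getD_set' par j k v hj]; split_ifs <;> rfl

theorem compress_set (N : Nat) (par : List Int) (d : Nat → Nat) (b f : Nat)
    (hG : GoodUF N par) (hM : MeasUF N par d b) (j : Nat) (hj : j < N) (hf : d j < f) :
    GoodUF N (par.set j ((rootF f par j : Nat) : Int)) ∧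
    MeasUF N (par.set j ((rootF f par j : Nat) : Int)) d b ∧
    ∀ y, y < N → ∀ g, d y < g →
      rootF g (par.set j ((rootF f par j : Nat) : Int)) y = rootF g par y := by
  have hjlen : j < par.length := by rw [hG.1]; exact hj
  obtain ⟨hroot, hrlt, hd0⟩ := rootF_isRoot N par d b hG hM f j hj hf
  set r := rootF f par j with hr
  have hpf : ∀ k, pfN (par.set j ((r : Nat) : Int)) k = if k = j then r else pfN par k := by
    intro k; rw [pfN_set par j k _ hjlen]; simp
  have hdr : pfN par j ≠ j → d r < d j := by
    intro hne
    have h2 := hM.2.1 j hj hne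
    -- d r = 0 < d j
    omega
  have hG' : GoodUF N (par.set j ((r : Nat) : Int)) := by
    refine ⟨by rw [List.length_set, hG.1], fun k hk => ?_⟩
    rw [hpf k]
    by_cases h : k = j
    · rw [h]; rw [getD_set' par j j _ hjlen]; simp [hrlt]
    · rw [getD_set' par j k _ hjlen, if_neg h, if_neg h]; exact hG.2 k hk
  have hM' : MeasUF N (par.set j ((r : Nat) : Int)) d b := by
    refine ⟨fun k hk hroot' => ?_, fun k hk hne => ?_, hM.2.2⟩
    · rw [hpf k] at hroot'
      by_cases h : k = j
      · rw [h] at hroot' ⊢; rw [if_pos rfl] at hroot'; rw [← hroot']; exact hd0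
      · rw [if_neg h] at hroot'; exact hM.1 k hk hroot'
    · rw [hpf k] at *
      by_cases h : k = j
      · rw [h] at hne ⊢; rw [if_pos rfl] at hne ⊢
        have hpj : pfN par j ≠ j := by
          intro hh
          exact hne (by rw [hr, rootF_of_root f par j hh])
        exact hdr hpj
      · rw [if_neg h] at *; exact hM.2.1 k hk hne
  refine ⟨hG', hM', ?_⟩
  intro y hy g hgy
  induction g generalizing y with
  | zero => omega
  | succ g ih =>
    by_cases hyj : y = j
    · subst hyj
      by_cases hrj : r = y
      · have hyroot : pfN par y = y := by
          by_contra hne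
          have h2 := hdr hne; rw [hrj] at h2; omega
        rw [rootF_of_root _ _ _ (by rw [hpf y]; simp [hrj]),
            rootF_of_root _ _ _ hyroot]
      · rw [rootF_step _ _ _ (by rw [hpf y]; simp [hrj])]
        rw [hpf y, if_pos rfl]
        have hrroot' : pfN (par.set y ((r : Nat) : Int)) r = r := by
          rw [hpf r, if_neg hrj]; exact hroot
        rw [rootF_of_root _ _ _ hrroot']
        rw [rootF_adequate N par d b hG hM (g+1) f y hy hgy hf]
    · by_cases hroot' : pfN par y = y
      · rw [rootF_of_root _ _ _ (by rw [hpf y]; simp [hyj, hroot']), rootF_of_root _ _ _ hroot']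
      · have hd := hM.2.1 y hy hroot'
        rw [rootF_step _ _ _ (by rw [hpf y]; simp [hyj, hroot']), rootF_step _ _ _ hroot']
        rw [hpf y, if_neg hyj]
        exact ih (pfN par y) (hG.2 y hy).2 (by omega)

theorem link_set (N : Nat) (par : List Int) (d : Nat → Nat) (b f : Nat)
    (hG : GoodUF N par) (hM : MeasUF N par d b) (c p : Nat) (hc : c < N) (hp : p < N)
    (hcr : pfN par c = c) (hpr : pfN par p = p) (hne : c ≠ p)
    (hbf : ∀ k, k < N → d k < f) :
    GoodUF N (par.set c ((p : Nat) : Int)) ∧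
    MeasUF N (par.set c ((p : Nat) : Int))
      (fun k => if rootF f par k = c then d k + 1 else d k) (b + 1) ∧
    ∀ y, y < N → ∀ g, (if rootF f par y = c then d y + 1 else d y) < g →
      rootF g (par.set c ((p : Nat) : Int)) y =
        (if rootF f par y = c then p else rootF f par y) := by
  have hclen : c < par.length := by rw [hG.1]; exact hc
  have hpf : ∀ k, pfN (par.set c ((p : Nat) : Int)) k = if k = c then p else pfN par k := by
    intro k; rw [pfN_set par c k _ hclen]; simp
  have hrc : rootF f par c = c := rootF_of_root f par c hcr
  have hrp : rootF f par p = p := rootF_of_root f par p hpr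
  have hclass : ∀ k, k < N → pfN par k ≠ k → rootF f par (pfN par k) = rootF f par k :=
    fun k hk _ => (rootF_pf N par d b hG hM f k hk (hbf k hk)).symm
  have hG' : GoodUF N (par.set c ((p : Nat) : Int)) := by
    refine ⟨by rw [List.length_set, hG.1], fun k hk => ?_⟩
    rw [hpf k]
    by_cases h : k = c
    · rw [h, getD_set' par c c _ hclen]; simp [hp]
    · rw [getD_set' par c k _ hclen, if_neg h, if_neg h]; exact hG.2 k hk
  have hM' : MeasUF N (par.set c ((p : Nat) : Int))
      (fun k => if rootF f par k = c then d k + 1 else d k) (b + 1) := by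
    refine ⟨fun k hk hroot' => ?_, fun k hk hne' => ?_, fun k hk => ?_⟩
    · rw [hpf k] at hroot'
      dsimp only
      by_cases h : k = c
      · rw [h, if_pos rfl] at hroot'
        exact absurd hroot'.symm hne
      · rw [if_neg h] at hroot'
        rw [rootF_of_root f par k hroot', if_neg h]
        exact hM.1 k hk hroot'
    · rw [hpf k] at hne'
      dsimp only
      by_cases h : k = c
      · rw [if_pos h] at hne'
        rw [hpf k, h, if_pos rfl, hrp, if_neg (fun hh => hne hh.symm), hrc, if_pos rfl]
        have h1 : d p = 0 := hM.1 p hp hpr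
        omega
      · rw [if_neg h] at hne'
        rw [hpf k, if_neg h, hclass k hk hne']
        have hstep := hM.2.1 k hk hne'
        split_ifs <;> omega
    · dsimp only; split_ifs <;> have := hM.2.2 k hk <;> omega
  refine ⟨hG', hM', ?_⟩
  intro y hy g hgy
  induction g generalizing y with
  | zero => omega
  | succ g ih =>
    by_cases hyc : y = c
    · rw [hyc] at hgy ⊢
      rw [rootF_step _ _ _ (by rw [hpf c, if_pos rfl]; exact Ne.symm hne)]
      rw [hpf c, if_pos rfl]
      rw [rootF_of_root _ _ _ (by rw [hpf p, if_neg (Ne.symm hne)]; exact hpr)]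
      rw [hrc, if_pos rfl]
    · by_cases hroot' : pfN par y = y
      · rw [rootF_of_root _ _ _ (by rw [hpf y]; simp [hyc, hroot'])]
        rw [rootF_of_root f _ _ hroot', if_neg hyc]
      · have hd := hM.2.1 y hy hroot'
        rw [rootF_step _ _ _ (by rw [hpf y]; simp [hyc, hroot']), hpf y, if_neg hyc]
        rw [← hclass y hy hroot']
        refine ih (pfN par y) (hG.2 y hy).2 ?_
        rw [hclass y hy hroot']
        split_ifs at hgy ⊢ <;> omega

theorem set_getD_self (xs : List Int) (j : Nat) (hj : j < xs.length) :
    xs.set j (xs.getD j 0) = xs := by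
  apply List.ext_getElem (by simp)
  intro k h1 h2
  simp only [List.getElem_set]
  split_ifs with h
  · subst h; simp [List.getD, List.getElem?_eq_getElem hj]
  · rfl

theorem findA_root (N : Nat) (f : Nat) (par : List Int) (k : Nat)
    (hG : GoodUF N par) (hk : k < N) (hroot : pfN par k = k) :
    findA f par ((k : Nat) : Int) = (((k : Nat) : Int), par) := by
  cases f with
  | zero => rfl
  | succ f =>
    have hlen : par.length = N := hG.1
    have hget : PySem.List.pyGetD par ((k : Nat) : Int) 0 = par.getD k 0 := by
      rw [pyGetD_norm par _ 0 (by omega) (by rw [hlen]; exact_mod_cast hk)]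
      rw [pvNorm_nonneg _ _ (by omega)]
      simp
    have hent : par.getD k 0 = ((k : Nat) : Int) := by
      have h0 := (hG.2 k hk).1
      have := hroot
      unfold pfN at this
      omega
    have hcond : (PySem.List.pyGetD par ((k : Nat) : Int) 0 == ((k : Nat) : Int)) = true := by
      rw [hget, hent]; simp
    simp only [findA, hcond, if_true]

theorem findA_spec (N : Nat) (d : Nat → Nat) (b : Nat) :
    ∀ f (par : List Int) (x : Int), GoodUF N par → MeasUF N par d b →
    -(N : Int) ≤ x → x < (N : Int) → d (pvNorm N x) < f →
    (findA f par x).1 = ((rootF f par (pvNorm N x) : Nat) : Int) ∧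
    GoodUF N (findA f par x).2 ∧ MeasUF N (findA f par x).2 d b ∧
    ∀ y, y < N → ∀ g, d y < g → rootF g (findA f par x).2 y = rootF g par y := by
  intro f
  induction f with
  | zero => intro par x _ _ _ _ h; omega
  | succ f ih =>
    intro par x hG hM hx1 hx2 hf
    have hlen : par.length = N := hG.1
    set nx := pvNorm N x with hnxdef
    have hnx : nx < N := pvNorm_lt N x hx1 hx2
    have hget : PySem.List.pyGetD par x 0 = par.getD nx 0 := by
      rw [pyGetD_norm par x 0 (by omega) (by omega), hlen]
    have hent0 : 0 ≤ par.getD nx 0 := (hG.2 nx hnx).1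
    have hentlt : pfN par nx < N := (hG.2 nx hnx).2
    have hent : par.getD nx 0 = ((pfN par nx : Nat) : Int) := by unfold pfN; omega
    by_cases hbe : par.getD nx 0 = x
    · -- parent equals x: x is a nonnegative root
      have hx0 : 0 ≤ x := hbe ▸ hent0
      have hroot : pfN par nx = nx := by
        have : nx = x.toNat := by rw [hnxdef, pvNorm_nonneg _ _ hx0]
        unfold pfN; omega
      have hcond : (par.getD nx 0 == x) = true := beq_iff_eq.mpr hbe
      have hres : findA (f+1) par x = (x, par) := by
        simp only [findA, hget, hcond, if_true]
      rw [hres]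
      refine ⟨?_, hG, hM, fun y hy g hgy => by trivial⟩
      rw [rootF_of_root _ _ _ hroot]
      simp only []
      omega
    · have hres : findA (f+1) par x =
          (PySem.List.pyGetD (PySem.List.pySetD (findA f par (par.getD nx 0)).2 x
              (findA f par (par.getD nx 0)).1) x 0,
            PySem.List.pySetD (findA f par (par.getD nx 0)).2 x
              (findA f par (par.getD nx 0)).1) := by
        have hcond : (par.getD nx 0 == x) = false := beq_eq_false_iff_ne.mpr hbe
        simp only [findA, hget, hcond, Bool.false_eq_true, if_false]
      by_cases hroot : pfN par nx = nx
      · -- x negative alias of a root: the recursive call is on the root itself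
        have hxneg : x < 0 := by
          rcases lt_or_ge x 0 with h | h
          · exact h
          · exfalso; apply hbe
            rw [hent, hroot]
            rw [hnxdef, pvNorm_nonneg _ _ h]
            omega
        have hrec : findA f par (par.getD nx 0) = (((nx : Nat) : Int), par) := by
          rw [hent, hroot]
          exact findA_root N f par nx hG hnx hroot
        rw [hres, hrec]
        have hset : PySem.List.pySetD par x ((nx : Nat) : Int) = par := by
          rw [pySetD_norm par x _ (by omega) (by omega), hlen, ← hnxdef]
          have hv : ((nx : Nat) : Int) = par.getD nx 0 := by rw [hent, hroot]
          rw [hv, set_getD_self par nx (by omega)]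
        simp only [hset]
        refine ⟨?_, hG, hM, fun y hy g hgy => by trivial⟩
        rw [hget, hent, hroot, rootF_of_root _ _ _ hroot]
      · -- proper recursive case
        have hdstep := hM.2.1 nx hnx hroot
        have hpx1 : -(N : Int) ≤ par.getD nx 0 := by omega
        have hpx2 : par.getD nx 0 < (N : Int) := by rw [hent]; exact_mod_cast hentlt
        have hnpx : pvNorm N (par.getD nx 0) = pfN par nx := by
          rw [pvNorm_nonneg _ _ hent0]; unfold pfN; rfl
        obtain ⟨ih1, ih2, ih3, ih4⟩ := ih par (par.getD nx 0) hG hM hpx1 hpx2 (by rw [hnpx]; omega)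
        set par1 := (findA f par (par.getD nx 0)).2 with hpar1
        have hlen1 : par1.length = N := ih2.1
        have hr : (findA f par (par.getD nx 0)).1 = ((rootF f par (pfN par nx) : Nat) : Int) := by
          rw [ih1, hnpx]
        have hrfull : rootF f par (pfN par nx) = rootF (f+1) par nx := (rootF_step f par nx hroot).symm
        have hr1 : rootF (f+1) par1 nx = rootF (f+1) par nx := ih4 nx hnx (f+1) (by omega)
        -- the written value is nx's root in par1
        have hrr : rootF (f+1) par1 nx = rootF f par (pfN par nx) := by rw [hr1, hrfull]
        have hsetn : PySem.List.pySetD par1 x ((rootF f par (pfN par nx) : Nat) : Int) =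
            par1.set nx ((rootF f par (pfN par nx) : Nat) : Int) := by
          rw [pySetD_norm par1 x _ (by rw [hlen1]; omega) (by rw [hlen1]; omega), hlen1, ← hnxdef]
        obtain ⟨cs1, cs2, cs3⟩ := compress_set N par1 d b (f+1) ih2 ih3 nx hnx (by omega)
        rw [hrr] at cs1 cs2 cs3
        rw [hres, hr, hsetn]
        refine ⟨?_, cs1, cs2, fun y hy g hgy => by rw [cs3 y hy g hgy, ih4 y hy g hgy]⟩
        rw [pyGetD_norm _ x 0 (by rw [List.length_set, hlen1]; omega)
              (by rw [List.length_set, hlen1]; omega), List.length_set, hlen1, ← hnxdef]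
        rw [getD_set' par1 nx nx _ (by rw [hlen1]; exact hnx), if_pos rfl]
        rw [← hrfull]

theorem sameCheckA_spec (N : Nat) (d : Nat → Nat) (b f : Nat) (par : List Int) (x y : Int)
    (hG : GoodUF N par) (hM : MeasUF N par d b)
    (hx1 : -(N : Int) ≤ x) (hx2 : x < (N : Int)) (hy1 : -(N : Int) ≤ y) (hy2 : y < (N : Int))
    (hbf : ∀ k, k < N → d k < f) :
    (sameCheckA f par x y).1 = decide (rootF f par (pvNorm N x) = rootF f par (pvNorm N y)) ∧
    GoodUF N (sameCheckA f par x y).2 ∧ MeasUF N (sameCheckA f par x y).2 d b ∧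
    ∀ z, z < N → ∀ g, d z < g → rootF g (sameCheckA f par x y).2 z = rootF g par z := by
  have hnx : pvNorm N x < N := pvNorm_lt N x hx1 hx2
  have hny : pvNorm N y < N := pvNorm_lt N y hy1 hy2
  obtain ⟨f1, f2, f3, f4⟩ := findA_spec N d b f par x hG hM hx1 hx2 (hbf _ hnx)
  set par1 := (findA f par x).2 with hp1
  obtain ⟨g1, g2, g3, g4⟩ := findA_spec N d b f par1 y f2 f3 hy1 hy2 (hbf _ hny)
  have hry : rootF f par1 (pvNorm N y) = rootF f par (pvNorm N y) :=
    f4 _ hny f (hbf _ hny)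
  refine ⟨?_, g2, g3, fun z hz g hg => by
    show rootF g (findA f par1 y).2 z = rootF g par z
    rw [g4 z hz g hg, f4 z hz g hg]⟩
  show ((findA f par x).1 == (findA f par1 y).1) = _
  rw [f1, g1, hry]
  by_cases h : rootF f par (pvNorm N x) = rootF f par (pvNorm N y)
  · simp [h]
  · have h2 : ((rootF f par (pvNorm N x) : Nat) : Int) ≠ ((rootF f par (pvNorm N y) : Nat) : Int) := by
      exact_mod_cast h
    simp [h, h2]

theorem unionA_spec (N : Nat) (d : Nat → Nat) (b f : Nat) (par rank : List Int) (x y : Int)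
    (hG : GoodUF N par) (hM : MeasUF N par d b)
    (hx1 : -(N : Int) ≤ x) (hx2 : x < (N : Int)) (hy1 : -(N : Int) ≤ y) (hy2 : y < (N : Int))
    (hbf : ∀ k, k < N → d k < f)
    (hne : rootF f par (pvNorm N x) ≠ rootF f par (pvNorm N y)) :
    GoodUF N (unionA f par rank x y).1 ∧
    ∃ d' rep,
      (rep = rootF f par (pvNorm N x) ∨ rep = rootF f par (pvNorm N y)) ∧
      MeasUF N (unionA f par rank x y).1 d' (b + 1) ∧
      ∀ z, z < N → ∀ g, d' z < g →
        rootF g (unionA f par rank x y).1 z =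
          (if rootF f par z = rootF f par (pvNorm N x) ∨
              rootF f par z = rootF f par (pvNorm N y)
           then rep else rootF f par z) := by
  have hnx : pvNorm N x < N := pvNorm_lt N x hx1 hx2
  have hny : pvNorm N y < N := pvNorm_lt N y hy1 hy2
  set rx := rootF f par (pvNorm N x) with hrx
  set ry := rootF f par (pvNorm N y) with hry
  obtain ⟨hrxr, hrxlt, hrxd⟩ := rootF_isRoot N par d b hG hM f (pvNorm N x) hnx (hbf _ hnx)
  obtain ⟨hryr, hrylt, hryd⟩ := rootF_isRoot N par d b hG hM f (pvNorm N y) hny (hbf _ hny)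
  obtain ⟨f1, f2, f3, f4⟩ := findA_spec N d b f par x hG hM hx1 hx2 (hbf _ hnx)
  set par1 := (findA f par x).2 with hp1
  obtain ⟨g1, g2, g3, g4⟩ := findA_spec N d b f par1 y f2 f3 hy1 hy2 (hbf _ hny)
  set par2 := (findA f par1 y).2 with hp2
  have hroots2 : ∀ z, z < N → ∀ g, d z < g → rootF g par2 z = rootF g par z :=
    fun z hz g hg => by rw [g4 z hz g hg, f4 z hz g hg]
  have hry1 : (findA f par1 y).1 = ((ry : Nat) : Int) := by
    rw [g1, f4 _ hny f (hbf _ hny)]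
  -- rx and ry are still roots of par2
  have hrxr2 : pfN par2 rx = rx := by
    have h1 : rootF f par2 rx = rx := by
      rw [hroots2 rx hrxlt f (hbf _ hrxlt), rootF_of_root f par rx hrxr]
    have := (rootF_isRoot N par2 d b g2 g3 f rx hrxlt (hbf _ hrxlt)).1
    rw [h1] at this; exact this
  have hryr2 : pfN par2 ry = ry := by
    have h1 : rootF f par2 ry = ry := by
      rw [hroots2 ry hrylt f (hbf _ hrylt), rootF_of_root f par ry hryr]
    have := (rootF_isRoot N par2 d b g2 g3 f ry hrylt (hbf _ hrylt)).1
    rw [h1] at this; exact this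
  have hroots2' : ∀ z, z < N → rootF f par2 z = rootF f par z :=
    fun z hz => hroots2 z hz f (hbf z hz)
  have hres : unionA f par rank x y =
      (if PySem.List.pyGetD rank ((rx : Nat) : Int) 0 < PySem.List.pyGetD rank ((ry : Nat) : Int) 0 then
        (PySem.List.pySetD par2 ((rx : Nat) : Int) ((ry : Nat) : Int), rank)
      else
        (PySem.List.pySetD par2 ((ry : Nat) : Int) ((rx : Nat) : Int),
          if PySem.List.pyGetD rank ((rx : Nat) : Int) 0 == PySem.List.pyGetD rank ((ry : Nat) : Int) 0 then
            PySem.List.pySetD rank ((rx : Nat) : Int) (PySem.List.pyGetD rank ((rx : Nat) : Int) 0 + 1)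
          else rank)) := by
    simp only [unionA, ← hp1, f1, ← hrx, hry1]
    split_ifs <;> rfl
  have hlen2 : par2.length = N := g2.1
  have hsetx : PySem.List.pySetD par2 ((rx : Nat) : Int) ((ry : Nat) : Int) =
      par2.set rx ((ry : Nat) : Int) := by
    rw [pySetD_norm par2 _ _ (by rw [hlen2]; omega) (by rw [hlen2]; exact_mod_cast hrxlt),
        hlen2, pvNorm_nonneg _ _ (by omega)]
    simp
  have hsety : PySem.List.pySetD par2 ((ry : Nat) : Int) ((rx : Nat) : Int) =
      par2.set ry ((rx : Nat) : Int) := by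
    rw [pySetD_norm par2 _ _ (by rw [hlen2]; omega) (by rw [hlen2]; exact_mod_cast hrylt),
        hlen2, pvNorm_nonneg _ _ (by omega)]
    simp
  rw [hres]
  by_cases hrank : PySem.List.pyGetD rank ((rx : Nat) : Int) 0 < PySem.List.pyGetD rank ((ry : Nat) : Int) 0
  · rw [if_pos hrank]
    -- par2.set rx ry : link c := rx under p := ry
    obtain ⟨l1, l2, l3⟩ := link_set N par2 d b f g2 g3 rx ry hrxlt hrylt hrxr2 hryr2
      (fun hh => hne (by rw [hrx, hry] at hh; exact hh)) hbf
    refine ⟨by simpa [hsetx] using l1, ⟨_, ry, Or.inr rfl, by simpa [hsetx] using l2, ?_⟩⟩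
    intro z hz g hg
    have := l3 z hz g (by simpa [hroots2' z hz] using hg)
    simp only [hsetx]
    rw [show (PySem.List.pySetD par2 ((rx : Nat) : Int) ((ry : Nat) : Int)) = par2.set rx ((ry : Nat) : Int) from hsetx] at *
    rw [this]
    rw [hroots2' z hz]
    by_cases h1 : rootF f par z = rx
    · simp [h1]
    · by_cases h2 : rootF f par z = ry
      · simp [h1, h2]
      · simp [h1, h2]
  · rw [if_neg hrank]
    obtain ⟨l1, l2, l3⟩ := link_set N par2 d b f g2 g3 ry rx hrylt hrxlt hryr2 hrxr2
      (fun hh => hne (by rw [hrx, hry] at hh; exact hh.symm)) hbf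
    refine ⟨by simpa [hsety] using l1, ⟨_, rx, Or.inl rfl, by simpa [hsety] using l2, ?_⟩⟩
    intro z hz g hg
    have := l3 z hz g (by simpa [hroots2' z hz] using hg)
    simp only [hsety]
    rw [this]
    rw [hroots2' z hz]
    by_cases h1 : rootF f par z = rx
    · simp [h1]
    · by_cases h2 : rootF f par z = ry
      · simp [h1, h2]
      · simp [h1, h2]

theorem getD_map (g : Int → Int) (lbl : List Int) (k : Nat) (hk : k < lbl.length) :
    (lbl.map g).getD k 0 = g (lbl.getD k 0) := by
  simp [List.getD, List.getElem?_map, List.getElem?_eq_getElem hk]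

theorem relabel_corr (N : Nat) (lbl : List Int) (hl : lbl.length = N)
    (R : Nat → Nat)
    (hC : ∀ i, i < N → ∀ j, j < N → (R i = R j ↔ lbl.getD i 0 = lbl.getD j 0))
    (na nb : Nat) (hna : na < N) (hnb : nb < N) (hne : R na ≠ R nb)
    (rep : Nat) (hrep : rep = R na ∨ rep = R nb) :
    ∀ i, i < N → ∀ j, j < N →
      ((if R i = R na ∨ R i = R nb then rep else R i) =
        (if R j = R na ∨ R j = R nb then rep else R j) ↔
      (lbl.map (fun l => if l == lbl.getD nb 0 then lbl.getD na 0 else l)).getD i 0 =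
        (lbl.map (fun l => if l == lbl.getD nb 0 then lbl.getD na 0 else l)).getD j 0) := by
  intro i hi j hj
  have hca : lbl.getD na 0 ≠ lbl.getD nb 0 := fun hh => hne ((hC na hna nb hnb).mpr hh)
  rw [getD_map _ lbl i (by omega), getD_map _ lbl j (by omega)]
  simp only [beq_iff_eq]
  have hia := hC i hi na hna
  have hib := hC i hi nb hnb
  have hja := hC j hj na hna
  have hjb := hC j hj nb hnb
  have hij := hC i hi j hj
  have key : ∀ k, k < N →
      (R k = R na ∨ R k = R nb) →
      (if lbl.getD k 0 = lbl.getD nb 0 then lbl.getD na 0 else lbl.getD k 0) = lbl.getD na 0 := by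
    intro k hk hk2
    rcases hk2 with h | h
    · have := (hC k hk na hna).mp h
      split_ifs with hh
      · rfl
      · exact this
    · have := (hC k hk nb hnb).mp h
      rw [if_pos this]
  have key2 : ∀ k, k < N →
      ¬(R k = R na ∨ R k = R nb) →
      (if lbl.getD k 0 = lbl.getD nb 0 then lbl.getD na 0 else lbl.getD k 0) = lbl.getD k 0 ∧
      lbl.getD k 0 ≠ lbl.getD na 0 := by
    intro k hk hk2
    push_neg at hk2
    refine ⟨?_, fun hh => hk2.1 ((hC k hk na hna).mpr hh)⟩
    rw [if_neg (fun hh => hk2.2 ((hC k hk nb hnb).mpr hh))]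
  by_cases h1 : R i = R na ∨ R i = R nb <;> by_cases h2 : R j = R na ∨ R j = R nb
  · rw [if_pos h1, if_pos h2, key i hi h1, key j hj h2]
    simp
  · rw [if_pos h1, if_neg h2, key i hi h1, (key2 j hj h2).1]
    constructor
    · intro hh
      exfalso
      apply h2
      rw [hh] at hrep
      tauto
    · intro hh
      exact absurd hh.symm (key2 j hj h2).2
  · rw [if_neg h1, if_pos h2, (key2 i hi h1).1, key j hj h2]
    constructor
    · intro hh
      exfalso
      apply h1
      rw [← hh] at hrep
      tauto
    · intro hh
      exact absurd hh (key2 i hi h1).2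
  · rw [if_neg h1, if_neg h2, (key2 i hi h1).1, (key2 j hj h2).1]
    exact hij

theorem fold_eq (N F : Nat) :
    ∀ (r : List (Int × Int × Int)) (res : Int) (par rank lbl : List Int) (b : Nat),
    (∀ e ∈ r, (-(N : Int) ≤ e.1 ∧ e.1 < (N : Int)) ∧ (-(N : Int) ≤ e.2.1 ∧ e.2.1 < (N : Int))) →
    GoodUF N par → lbl.length = N →
    (∃ d, MeasUF N par d b) →
    (∀ i, i < N → ∀ j, j < N →
      (rootF F par i = rootF F par j ↔ lbl.getD i 0 = lbl.getD j 0)) →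
    b + r.length < F →
    (r.foldl (fun st e =>
      let res := st.1
      let par := st.2.1
      let rank := st.2.2
      let sc := sameCheckA F par e.1 e.2.1
      if sc.1 then
        (if e.2.2 > 0 then (res + e.2.2, sc.2, rank) else (res, sc.2, rank))
      else
        let ur := unionA F sc.2 rank e.1 e.2.1
        (res, ur.1, ur.2)) (res, par, rank)).1 =
    (r.foldl (fun (st : Int × List Int) e =>
      let ca := PySem.List.pyGetD st.2 e.1 0
      let cb := PySem.List.pyGetD st.2 e.2.1 0
      if ca == cb then
        (if e.2.2 > 0 then (st.1 + e.2.2, st.2) else (st.1, st.2))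
      else (st.1, st.2.map (fun l => if l == cb then ca else l))) (res, lbl)).1 := by
  intro r
  induction r with
  | nil => intro res par rank lbl b _ _ _ _ _ _; rfl
  | cons e r ih =>
    intro res par rank lbl b hbnd hG hl hM hC hbF
    obtain ⟨⟨ha1, ha2⟩, hb1, hb2⟩ := hbnd e (List.mem_cons_self)
    obtain ⟨d, hM⟩ := hM
    have hrl : b + (r.length + 1) < F := by simpa using hbF
    have hbf : ∀ k, k < N → d k < F := fun k hk => by have := hM.2.2 k hk; omega
    set na := pvNorm N e.1 with hna
    set nb := pvNorm N e.2.1 with hnb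
    have hna' : na < N := pvNorm_lt N e.1 ha1 ha2
    have hnb' : nb < N := pvNorm_lt N e.2.1 hb1 hb2
    obtain ⟨s1, s2, s3, s4⟩ := sameCheckA_spec N d b F par e.1 e.2.1 hG hM ha1 ha2 hb1 hb2 hbf
    have hcaB : PySem.List.pyGetD lbl e.1 0 = lbl.getD na 0 := by
      rw [pyGetD_norm lbl e.1 0 (by rw [hl]; exact ha1) (by rw [hl]; exact ha2), hl]
    have hcbB : PySem.List.pyGetD lbl e.2.1 0 = lbl.getD nb 0 := by
      rw [pyGetD_norm lbl e.2.1 0 (by rw [hl]; exact hb1) (by rw [hl]; exact hb2), hl]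
    rw [List.foldl_cons, List.foldl_cons]
    change (List.foldl _
      (if (sameCheckA F par e.1 e.2.1).1 then
        (if e.2.2 > 0 then (res + e.2.2, (sameCheckA F par e.1 e.2.1).2, rank)
         else (res, (sameCheckA F par e.1 e.2.1).2, rank))
       else (res, (unionA F (sameCheckA F par e.1 e.2.1).2 rank e.1 e.2.1).1,
          (unionA F (sameCheckA F par e.1 e.2.1).2 rank e.1 e.2.1).2)) r).1 =
      (List.foldl _
      (if (PySem.List.pyGetD lbl e.1 0 == PySem.List.pyGetD lbl e.2.1 0) then
        (if e.2.2 > 0 then (res + e.2.2, lbl) else (res, lbl))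
       else (res, lbl.map (fun l =>
          if l == PySem.List.pyGetD lbl e.2.1 0 then PySem.List.pyGetD lbl e.1 0 else l))) r).1
    by_cases hsame : rootF F par na = rootF F par nb
    · have hA : (sameCheckA F par e.1 e.2.1).1 = true := by
        rw [s1]; simp only [decide_eq_true_eq]; exact hsame
      have hB : (PySem.List.pyGetD lbl e.1 0 == PySem.List.pyGetD lbl e.2.1 0) = true := by
        rw [hcaB, hcbB]; simp only [beq_iff_eq]; exact (hC na hna' nb hnb').mp hsame
      rw [hA, hB, if_pos rfl, if_pos rfl]
      have hC' : ∀ i, i < N → ∀ j, j < N →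
          (rootF F (sameCheckA F par e.1 e.2.1).2 i = rootF F (sameCheckA F par e.1 e.2.1).2 j ↔
            lbl.getD i 0 = lbl.getD j 0) := by
        intro i hi j hj
        rw [s4 i hi F (hbf i hi), s4 j hj F (hbf j hj)]
        exact hC i hi j hj
      by_cases hpos : e.2.2 > 0
      · rw [if_pos hpos, if_pos hpos]
        exact ih (res + e.2.2) _ rank lbl b (fun e' he' => hbnd e' (List.mem_cons_of_mem _ he'))
          s2 hl ⟨d, s3⟩ hC' (by omega)
      · rw [if_neg hpos, if_neg hpos]
        exact ih res _ rank lbl b (fun e' he' => hbnd e' (List.mem_cons_of_mem _ he'))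
          s2 hl ⟨d, s3⟩ hC' (by omega)
    · have hA : (sameCheckA F par e.1 e.2.1).1 = false := by
        rw [s1]; simp only [decide_eq_false_iff_not]; exact hsame
      have hB : (PySem.List.pyGetD lbl e.1 0 == PySem.List.pyGetD lbl e.2.1 0) = false := by
        rw [hcaB, hcbB]; simp only [beq_eq_false_iff_ne]
        exact fun hh => hsame ((hC na hna' nb hnb').mpr hh)
      rw [hA, hB]
      rw [if_neg (by simp), if_neg (by simp)]
      -- union step
      have hs4F : ∀ z, z < N → rootF F (sameCheckA F par e.1 e.2.1).2 z = rootF F par z :=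
        fun z hz => s4 z hz F (hbf z hz)
      have hne1 : rootF F (sameCheckA F par e.1 e.2.1).2 na ≠
          rootF F (sameCheckA F par e.1 e.2.1).2 nb := by
        rw [hs4F na hna', hs4F nb hnb']; exact hsame
      obtain ⟨u1, d', rep, hrep, u2, u3⟩ :=
        unionA_spec N d b F (sameCheckA F par e.1 e.2.1).2 rank e.1 e.2.1 s2 s3
          ha1 ha2 hb1 hb2 hbf hne1
      have hreproots : rep = rootF F par na ∨ rep = rootF F par nb := by
        rcases hrep with h | h
        · left; rw [h, hs4F na hna']
        · right; rw [h, hs4F nb hnb']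
      have hroot' : ∀ z, z < N →
          rootF F (unionA F (sameCheckA F par e.1 e.2.1).2 rank e.1 e.2.1).1 z =
            (if rootF F par z = rootF F par na ∨ rootF F par z = rootF F par nb
             then rep else rootF F par z) := by
        intro z hz
        have hd' : ∀ w, w < N → d' w ≤ b + 1 := fun w hw => u2.2.2 w hw
        rw [u3 z hz F (by have := hd' z hz; omega)]
        rw [hs4F z hz, hs4F na hna', hs4F nb hnb']
      have hC' : ∀ i, i < N → ∀ j, j < N →
          (rootF F (unionA F (sameCheckA F par e.1 e.2.1).2 rank e.1 e.2.1).1 i =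
            rootF F (unionA F (sameCheckA F par e.1 e.2.1).2 rank e.1 e.2.1).1 j ↔
          (lbl.map (fun l =>
            if l == PySem.List.pyGetD lbl e.2.1 0 then PySem.List.pyGetD lbl e.1 0 else l)).getD i 0 =
          (lbl.map (fun l =>
            if l == PySem.List.pyGetD lbl e.2.1 0 then PySem.List.pyGetD lbl e.1 0 else l)).getD j 0) := by
        intro i hi j hj
        rw [hroot' i hi, hroot' j hj]
        simp only [hcaB, hcbB]
        exact relabel_corr N lbl hl (rootF F par) hC na nb hna' hnb' hsame rep hreproots i hi j hj
      exact ih res _ _ _ (b + 1) (fun e' he' => hbnd e' (List.mem_cons_of_mem _ he'))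
        u1 (by rw [List.length_map, hl]) ⟨d', u2⟩ hC' (by omega)

theorem init_getD (n : Int) :
    ∀ k, k < (n + 1).toNat → (PySem.List.pyRange 0 (n + 1) 1).getD k 0 = (k : Int) := by
  intro k hk
  rw [PySem.List.pyRange_one]
  simp only [sub_zero] at *
  simp [List.getD, hk]

theorem solve_eq_alt (n : Int) (m : Int) (abc_list : List (Int × Int × Int))
    (hP : Pre_solve n m abc_list) : solve n m abc_list = solve_alt n m abc_list := by
  rcases hP with hnil | ⟨hn, hbnd⟩
  · subst hnil; rfl
  · have hN : (((n + 1).toNat : Nat) : Int) = n + 1 := Int.toNat_of_nonneg (by omega)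
    simp only [solve, solve_alt]
    have hlen0 : (PySem.List.pyRange 0 (n + 1) 1).length = (n + 1).toNat := by
      rw [PySem.List.length_pyRange_one]; simp
    have hget0 := init_getD n
    have hpf0 : ∀ k, k < (n + 1).toNat → pfN (PySem.List.pyRange 0 (n + 1) 1) k = k := by
      intro k hk; unfold pfN; rw [hget0 k hk]; omega
    have hmap : (PySem.List.pyRange 0 (n + 1) 1).map (fun i => i) =
        PySem.List.pyRange 0 (n + 1) 1 := List.map_id' _
    rw [hmap]
    apply fold_eq ((n + 1).toNat) ((n + 1).toNat + abc_list.length + 1) _ 0 _ _ _ 0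
    · intro e he
      have := hbnd e ((PySem.List.mem_sorted _ _ _ _).mp he)
      constructor
      · constructor <;> omega
      · constructor <;> omega
    · exact ⟨hlen0, fun k hk => by
        rw [hget0 k hk]
        constructor
        · omega
        · unfold pfN; rw [hget0 k hk]; omega⟩
    · exact hlen0
    · exact ⟨fun _ => 0, fun k hk h => rfl, fun k hk hne => absurd (hpf0 k hk) hne,
        fun k hk => Nat.le_refl 0⟩
    · intro i hi j hj
      rw [rootF_of_root _ _ _ (hpf0 i hi), rootF_of_root _ _ _ (hpf0 j hj)]
      rw [hget0 i hi, hget0 j hj]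
      omega
    · rw [PySem.List.length_sorted]
      omega


-- ===== VERDICT (by name: the statement is the Claim_ definition above) =====
theorem solve_spec : Claim_equal_solve := by
  intro n m abc_list _ hP
  unfold Spec_solve
  exact solve_eq_alt n m abc_list hP
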